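-- pv_equiv track=rewrite | github.com/oxcandidate/ARG-Builder | python_scripts/hudson_bound.py | find_disjoint_pairs
-- ===== SOURCE A (Python) =====
-- def find_disjoint_pairs(all_pairs, current_pairs, number_needed):
--     if number_needed == 0:
--         return current_pairs
--
--     if len(all_pairs) == 0:
--         return []
--
--     current_points = {i for pair in current_pairs for i in pair}
--
--     (i, j) = all_pairs[0]
--     if i in current_points or j in current_points:
--         return find_disjoint_pairs(all_pairs[1:], current_pairs[:], number_needed)
--     else:
--         result = find_disjoint_pairs(all_pairs[1:], current_pairs + [(i,j)], number_needed - 1)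
--         if result == []:
--             result = find_disjoint_pairs(all_pairs[1:], current_pairs[:], number_needed)
--
--         return result
-- ===== SOURCE B (Python) =====
-- def find_disjoint_pairs(all_pairs, current_pairs, number_needed):
--     if number_needed == 0:
--         return current_pairs
--     stack = [(all_pairs, current_pairs, number_needed)]
--     while stack:
--         pairs, chosen, need = stack.pop()
--         if need == 0:
--             return chosen
--         if not pairs:
--             continue
--         (i, j) = pairs[0]
--         used = {p for pair in chosen for p in pair}
--         # skip branch pushed first so the include branch is explored first (LIFO)
--         stack.append((pairs[1:], chosen, need))
--         if i not in used and j not in used: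
--             stack.append((pairs[1:], chosen + [(i, j)], need - 1))
--     return []
-- ===== Notes on version B (the rewrite author's own statement) =====
-- stated objective: alternative
-- what changed: The recursive backtracker is replaced by an iterative depth-first search over an explicit LIFO work-stack of (remaining-pairs, chosen, still-needed) frames, returning the first completed frame popped; the entry case number_needed==0 returns current_pairs directly.
import Mathlib
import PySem

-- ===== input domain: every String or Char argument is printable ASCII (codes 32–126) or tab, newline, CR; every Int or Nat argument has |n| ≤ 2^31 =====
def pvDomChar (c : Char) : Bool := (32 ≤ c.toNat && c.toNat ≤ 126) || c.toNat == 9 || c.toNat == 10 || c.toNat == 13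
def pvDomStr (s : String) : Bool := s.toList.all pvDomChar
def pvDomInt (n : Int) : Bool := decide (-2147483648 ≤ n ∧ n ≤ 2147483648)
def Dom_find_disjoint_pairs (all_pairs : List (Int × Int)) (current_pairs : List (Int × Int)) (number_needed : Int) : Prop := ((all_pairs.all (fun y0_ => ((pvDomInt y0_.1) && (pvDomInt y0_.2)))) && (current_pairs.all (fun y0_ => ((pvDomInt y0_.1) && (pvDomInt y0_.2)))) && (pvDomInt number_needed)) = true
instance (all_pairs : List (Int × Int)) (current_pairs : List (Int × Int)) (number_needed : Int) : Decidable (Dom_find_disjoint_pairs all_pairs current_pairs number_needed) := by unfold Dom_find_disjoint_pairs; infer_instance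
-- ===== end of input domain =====

-- ===== PORT A =====
-- B replaces A's recursive backtracker by an iterative DFS over an explicit work-stack (alternative decomposition, same results).
def find_disjoint_pairs (all_pairs : List (Int × Int)) (current_pairs : List (Int × Int)) (number_needed : Int) : List (Int × Int) :=
  if number_needed = 0 then current_pairs
  else if all_pairs.length = 0 then []
  else
    match all_pairs with
    | [] => []  -- unreachable: length ≠ 0
    | (i, j) :: rest =>
      let current_points := PySem.Set.ofList (current_pairs.flatMap (fun pair => [pair.1, pair.2]))
      if PySem.Set.contains current_points i || PySem.Set.contains current_points j then
        find_disjoint_pairs rest current_pairs number_needed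
      else
        let result := find_disjoint_pairs rest (current_pairs ++ [(i, j)]) (number_needed - 1)
        if result = [] then find_disjoint_pairs rest current_pairs number_needed
        else result
termination_by all_pairs.length

-- ===== PORT B =====
-- the while loop of Source B: the stack holds (remaining pairs, chosen, still needed) frames
def pvDfs (stack : List (List (Int × Int) × List (Int × Int) × Int)) : List (Int × Int) :=
  match stack with
  | [] => []
  | (pairs, chosen, need) :: rest_stack =>
    if need = 0 then chosen
    else
      match pairs with
      | [] => pvDfs rest_stack
      | (i, j) :: tail =>
        let used := PySem.Set.ofList (chosen.flatMap (fun pair => [pair.1, pair.2]))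
        -- skip branch pushed first so the include branch is explored first (LIFO)
        if !(PySem.Set.contains used i) && !(PySem.Set.contains used j) then
          pvDfs ((tail, chosen ++ [(i, j)], need - 1) :: (tail, chosen, need) :: rest_stack)
        else
          pvDfs ((tail, chosen, need) :: rest_stack)
termination_by (stack.map (fun f => 3 ^ f.1.length)).sum
decreasing_by
  all_goals simp [List.map, List.sum_cons, pow_succ]
  all_goals have h3 : 0 < 3 ^ tail.length := Nat.pow_pos (by norm_num)
  all_goals omega

def find_disjoint_pairs_alt (all_pairs : List (Int × Int)) (current_pairs : List (Int × Int)) (number_needed : Int) : List (Int × Int) :=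
  if number_needed = 0 then current_pairs
  else pvDfs [(all_pairs, current_pairs, number_needed)]

-- ===== PRECONDITION & SPEC =====
def Spec_find_disjoint_pairs (all_pairs : List (Int × Int)) (current_pairs : List (Int × Int)) (number_needed : Int) (out : List (Int × Int)) : Prop := out = find_disjoint_pairs_alt all_pairs current_pairs number_needed
instance (all_pairs : List (Int × Int)) (current_pairs : List (Int × Int)) (number_needed : Int) (out : List (Int × Int)) : Decidable (Spec_find_disjoint_pairs all_pairs current_pairs number_needed out) := by unfold Spec_find_disjoint_pairs; infer_instance

-- ===== CLAIM (what is proved, stated in full; the proofs are below) =====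
def Claim_equal_find_disjoint_pairs : Prop := ∀ (all_pairs : List (Int × Int)) (current_pairs : List (Int × Int)) (number_needed : Int), Dom_find_disjoint_pairs all_pairs current_pairs number_needed → Spec_find_disjoint_pairs all_pairs current_pairs number_needed (find_disjoint_pairs all_pairs current_pairs number_needed)

-- ===== LEMMAS AND PROOFS =====

-- key lemma: one frame on top of the stack behaves like A's recursion on that frame
theorem pvDfs_frame (pairs : List (Int × Int)) :
    ∀ (chosen : List (Int × Int)) (need : Int)
      (st : List (List (Int × Int) × List (Int × Int) × Int)),
      (need = 0 → chosen ≠ []) →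
      pvDfs ((pairs, chosen, need) :: st) =
        if find_disjoint_pairs pairs chosen need = [] then pvDfs st
        else find_disjoint_pairs pairs chosen need := by
  induction pairs with
  | nil =>
    intro chosen need st hinv
    by_cases h0 : need = 0
    · subst h0
      simp [pvDfs, find_disjoint_pairs, hinv rfl]
    · simp [pvDfs, find_disjoint_pairs, h0]
  | cons hd tl ih =>
    intro chosen need st hinv
    obtain ⟨i, j⟩ := hd
    by_cases h0 : need = 0
    · subst h0
      simp [pvDfs, find_disjoint_pairs, hinv rfl]
    · rw [pvDfs, find_disjoint_pairs]
      simp only [h0, List.length_cons, if_false]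
      cases hci : PySem.Set.contains (PySem.Set.ofList (chosen.flatMap (fun pair => [pair.1, pair.2]))) i with
      | true =>
        simp only [Bool.true_or, Bool.not_true, Bool.false_and]
        rw [ih chosen need st hinv]
        simp
      | false =>
        cases hcj : PySem.Set.contains (PySem.Set.ofList (chosen.flatMap (fun pair => [pair.1, pair.2]))) j with
        | true =>
          simp only [Bool.or_true, Bool.not_true, Bool.and_false]
          rw [ih chosen need st hinv]
          simp
        | false =>
          simp only [Bool.false_or, Bool.not_false, Bool.and_self]
          rw [ih (chosen ++ [(i, j)]) (need - 1) ((tl, chosen, need) :: st) (by simp)]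
          rw [ih chosen need st hinv]
          by_cases hr : find_disjoint_pairs tl (chosen ++ [(i, j)]) (need - 1) = []
          · simp [hr]
          · simp [hr]

-- ===== VERDICT (by name: the statement is the Claim_ definition above) =====
theorem find_disjoint_pairs_spec : Claim_equal_find_disjoint_pairs := by
  intro all_pairs current_pairs number_needed _
  unfold Spec_find_disjoint_pairs find_disjoint_pairs_alt
  by_cases h0 : number_needed = 0
  · subst h0
    rw [find_disjoint_pairs.eq_def]
    simp
  · rw [if_neg h0, pvDfs_frame all_pairs current_pairs number_needed [] (fun h => absurd h h0)]
    by_cases hr : find_disjoint_pairs all_pairs current_pairs number_needed = []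
    · simp [hr, pvDfs]
    · simp [hr]
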